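-- pv_equiv track=rewrite | github.com/Anna-Hax/cp-dsa | code/contests/div3Contest/1/B.py | can_vanya_win
-- ===== SOURCE A (Python) =====
-- def can_vanya_win(n):
--     n_str = str(n)
--     count = 0
--     l_num = []
--     if len(n_str) == 1:
--         return count, l_num
--     else:
--         for i in range(len(n_str)):
--             num = n_str[:i+1]
--             for j in range(1, len(n_str) - i):
--                 zeros = '0' * (j)
--
--                 big_num = int(str(num) + zeros)
--                 num = int(num)
--
--                 if num + big_num == n:
--                     count += 1
--                     l_num.append(num)
--
--         return count, l_num
-- ===== SOURCE B (Python) =====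
-- def can_vanya_win(n):
--     s = str(n)
--     count = 0
--     l_num = []
--     if len(s) == 1:
--         return count, l_num
--     for i in range(len(s)):
--         j = len(s) - i - 1
--         if j >= 1:
--             num = int(s[:i + 1])
--             if num + int(s[:i + 1] + '0' * j) == n:
--                 count += 1
--                 l_num.append(num)
--     return count, l_num
-- ===== Notes on version B (the rewrite author's own statement) =====
-- stated objective: simpler
-- what changed: B drops A's inner loop over zero counts: for a given prefix only a single zero count can satisfy the equation, so B performs one check per prefix instead of scanning every suffix length.
import Mathlib
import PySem

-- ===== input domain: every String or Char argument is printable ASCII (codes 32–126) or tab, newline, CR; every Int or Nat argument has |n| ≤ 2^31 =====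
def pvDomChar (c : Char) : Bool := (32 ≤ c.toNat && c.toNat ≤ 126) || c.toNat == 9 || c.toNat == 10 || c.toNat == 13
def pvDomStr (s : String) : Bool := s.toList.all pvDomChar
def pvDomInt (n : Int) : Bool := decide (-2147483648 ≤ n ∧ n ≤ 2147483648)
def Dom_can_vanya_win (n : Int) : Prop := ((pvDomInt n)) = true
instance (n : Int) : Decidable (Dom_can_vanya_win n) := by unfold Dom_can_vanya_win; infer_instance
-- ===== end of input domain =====

-- B drops A's inner loop over zero counts (only one count can ever match a given prefix): one check per prefix; objective: simpler.

-- ===== PORT A =====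
-- Literal port of A.  Python rebinds `num` from str to int inside the inner loop; on the
-- admitted inputs (0 ≤ n) str(int(prefix)) equals the prefix (str(n) has no leading zeros),
-- so re-reading the slice on every inner iteration is exact.  int(...) raises nowhere on
-- Pre_ (all-digit slices), so the total form .getD 0 is never the default there.
def can_vanya_win (n : Int) : Int × List Int :=
  let nStr := PySem.Int.toChars n
  let count : Int := 0
  let lNum : List Int := []
  if PySem.List.len nStr = 1 then (count, lNum)
  else
    (PySem.List.pyRange 0 (PySem.List.len nStr) 1).foldl (fun st i =>
      let num := PySem.List.slice nStr none (some (i + 1))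
      (PySem.List.pyRange 1 (PySem.List.len nStr - i) 1).foldl (fun st2 j =>
        let zeros := List.replicate j.toNat '0'
        let bigNum := (PySem.Int.ofChars? (num ++ zeros)).getD 0
        let numV := (PySem.Int.ofChars? num).getD 0
        if numV + bigNum = n then (st2.1 + 1, st2.2 ++ [numV]) else st2) st)
      (count, lNum)

-- ===== PORT B =====
def can_vanya_win_alt (n : Int) : Int × List Int :=
  let s := PySem.Int.toChars n
  let count : Int := 0
  let lNum : List Int := []
  if PySem.List.len s = 1 then (count, lNum)
  else
    (PySem.List.pyRange 0 (PySem.List.len s) 1).foldl (fun st i =>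
      let j := PySem.List.len s - i - 1
      if 1 ≤ j then
        let num := (PySem.Int.ofChars? (PySem.List.slice s none (some (i + 1)))).getD 0
        if num + (PySem.Int.ofChars? (PySem.List.slice s none (some (i + 1)) ++ List.replicate j.toNat '0')).getD 0 = n
        then (st.1 + 1, st.2 ++ [num]) else st
      else st)
      (count, lNum)

-- ===== PRECONDITION & SPEC =====
-- Python A raises ValueError on every negative n (int("-") on the one-character prefix), so
-- Pre_ admits exactly the nonnegative inputs, on all of which A returns normally.
def Pre_can_vanya_win (n : Int) : Prop := 0 ≤ n
instance (n : Int) : Decidable (Pre_can_vanya_win n) := by unfold Pre_can_vanya_win; infer_instance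
def pvWitness_can_vanya_win : Int := 505
def Spec_can_vanya_win (n : Int) (out : Int × List Int) : Prop := out = can_vanya_win_alt n
instance (n : Int) (out : Int × List Int) : Decidable (Spec_can_vanya_win n out) := by unfold Spec_can_vanya_win; infer_instance

-- ===== CLAIM (what is proved, stated in full; the proofs are below) =====
def Claim_equal_can_vanya_win : Prop := ∀ (n : Int), Dom_can_vanya_win n → Pre_can_vanya_win n → Spec_can_vanya_win n (can_vanya_win n)

-- ===== LEMMAS AND PROOFS =====

-- decimal digit step: acc * 10 + value of digit c
def dstep (a : Nat) (c : Char) : Nat := a * 10 + (c.toNat - '0'.toNat)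

-- value of a digit string
def dval (l : List Char) : Nat := l.foldl dstep 0

-- any function with these two equations sends a digit string tl (state true/acc) to its value
lemma goLike_eq (g : List Char → Bool → Nat → Option Nat)
    (hs : ∀ (x : Char) (rest : List Char) (b : Bool) (acc : Nat), x.isDigit = true →
        g (x :: rest) b acc = g rest true (acc * 10 + (x.toNat - '0'.toNat)))
    (hb : ∀ (acc : Nat), g [] true acc = some acc) :
    ∀ (tl : List Char) (acc : Nat), (∀ x ∈ tl, x.isDigit = true) →
      g tl true acc = some (List.foldl dstep acc tl) := by
  intro tl
  induction tl with
  | nil => intro acc _; simpa using hb acc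
  | cons x rest IH =>
      intro acc hd
      rw [hs x rest true acc (hd x (by simp))]
      simpa [dstep] using IH _ (fun y hy => hd y (by simp [hy]))

lemma isIntSpace_of_digit (c : Char) (h : c.isDigit = true) : PySem.Int.isIntSpace c = false := by
  simp only [Char.isDigit] at h
  simp only [PySem.Int.isIntSpace]
  simp only [Bool.or_eq_false_iff, decide_eq_false_iff_not]
  rw [Bool.and_eq_true, decide_eq_true_iff, decide_eq_true_iff] at h
  refine ⟨⟨⟨⟨⟨?_,?_⟩,?_⟩,?_⟩,?_⟩,?_⟩ <;> rintro rfl <;> simp at h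

lemma strip_id (ds : List Char) (h : ∀ c ∈ ds, c.isDigit = true) :
    (List.dropWhile PySem.Int.isIntSpace (List.dropWhile PySem.Int.isIntSpace ds).reverse).reverse = ds := by
  have h1 : ∀ (l : List Char), (∀ c ∈ l, c.isDigit = true) → List.dropWhile PySem.Int.isIntSpace l = l := by
    intro l hl
    rw [List.dropWhile_eq_self_iff]
    intro hlen
    have := hl _ (List.head_mem (by intro he; simp [he] at hlen))
    rw [List.head_eq_getElem] at this
    simp [isIntSpace_of_digit _ this]
  rw [h1 _ h, h1]
  · exact List.reverse_reverse ds
  · intro c hc; exact h c (by simpa using hc)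

lemma digit_bounds (c : Char) (hc : c.isDigit = true) : 48 ≤ c.toNat ∧ c.toNat ≤ 57 := by
  simp only [Char.isDigit] at hc
  rw [Bool.and_eq_true, decide_eq_true_iff, decide_eq_true_iff] at hc
  obtain ⟨h1, h2⟩ := hc
  rw [ge_iff_le, UInt32.le_iff_toNat_le] at h1
  rw [UInt32.le_iff_toNat_le] at h2
  exact ⟨h1, h2⟩

lemma digit_ne_minus (c : Char) (h : c.isDigit = true) : c ≠ '-' := by
  rintro rfl; simp [Char.isDigit] at h

lemma digit_ne_plus (c : Char) (h : c.isDigit = true) : c ≠ '+' := by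
  rintro rfl; simp [Char.isDigit] at h

lemma parse_digits (c : Char) (tl : List Char) (hc : c.isDigit = true)
    (h : ∀ x ∈ tl, x.isDigit = true)
    (hstrip : (List.dropWhile PySem.Int.isIntSpace (List.dropWhile PySem.Int.isIntSpace (c :: tl)).reverse).reverse = c :: tl)
    (hm : c ≠ '-') (hp : c ≠ '+') :
    PySem.Int.ofChars? (c :: tl) = some ((List.foldl dstep (dstep 0 c) tl : Nat) : Int) := by
  conv_lhs => unfold PySem.Int.ofChars?
  rw [hstrip]
  conv_lhs => whnf
  split
  · next ds heq => exact absurd (by injection heq.symm with h1 _; exact h1.symm) hm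
  · next ds heq => exact absurd (by injection heq.symm with h1 _; exact h1.symm) hp
  · next ds hne1 hne2 =>
      rw [Option.map_eq_some_iff]
      refine ⟨((List.foldl dstep (dstep 0 c) tl : Nat) : Int), ?_, rfl⟩
      show Option.bind _ _ = _
      rw [Option.bind_eq_some_iff]
      refine ⟨List.foldl dstep (dstep 0 c) tl, ?_, rfl⟩
      conv_lhs => whnf
      rw [hc]
      conv_lhs => whnf
      refine (goLike_eq _ ?hs ?hb tl _ h).trans (by simp [dstep])
      case hs =>
        intro x rest b acc hx
        conv_lhs => whnf
        rw [hx]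
        conv_lhs => whnf
      case hb => intro acc; rfl

-- int(s) on a nonempty all-digit string s is its decimal value
lemma ofChars?_digits (ds : List Char) (hne : ds ≠ []) (h : ∀ c ∈ ds, c.isDigit = true) :
    PySem.Int.ofChars? ds = some ((dval ds : Nat) : Int) := by
  rcases ds with _ | ⟨c, tl⟩
  · exact absurd rfl hne
  · rw [parse_digits c tl (h c (by simp)) (fun x hx => h x (by simp [hx]))
      (strip_id _ h) (digit_ne_minus c (h c (by simp))) (digit_ne_plus c (h c (by simp)))]
    rfl

-- reference decimal printer
def myDigits (n : Nat) : List Char :=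
  if n < 10 then [Nat.digitChar n]
  else myDigits (n / 10) ++ [Nat.digitChar (n % 10)]
decreasing_by exact Nat.div_lt_self (by omega) (by omega)

lemma toDigitsCore_eq : ∀ (fuel n : Nat) (acc : List Char), n < fuel →
    Nat.toDigitsCore 10 fuel n acc = myDigits n ++ acc := by
  intro fuel
  induction fuel with
  | zero => intro n acc h; omega
  | succ fuel IH =>
      intro n acc h
      rw [Nat.toDigitsCore]
      by_cases h0 : n / 10 = 0
      · have hn : n < 10 := by omega
        rw [if_pos h0, myDigits, if_pos hn, Nat.mod_eq_of_lt hn]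
        simp
      · have hn : ¬ n < 10 := by omega
        rw [if_neg h0, IH _ _ (by omega)]
        conv_rhs => rw [myDigits, if_neg hn]
        simp

lemma toChars_eq (n : Int) (h : 0 ≤ n) : PySem.Int.toChars n = myDigits n.toNat := by
  rw [PySem.Int.toChars, if_neg (by omega), Nat.toDigits]
  rw [toDigitsCore_eq (n.toNat + 1) n.toNat [] (by omega), List.append_nil]

lemma digitChar_digit (d : Nat) (h : d < 10) : (Nat.digitChar d).isDigit = true := by
  interval_cases d <;> decide

lemma digitChar_val (d : Nat) (h : d < 10) : (Nat.digitChar d).toNat - '0'.toNat = d := by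
  interval_cases d <;> decide

lemma digitChar_ne_zero (d : Nat) (h1 : 1 ≤ d) (h2 : d < 10) : Nat.digitChar d ≠ '0' := by
  interval_cases d <;> decide

lemma myDigits_digits (m : Nat) : ∀ c ∈ myDigits m, c.isDigit = true := by
  induction m using myDigits.induct with
  | case1 m h => rw [myDigits, if_pos h]; simpa using digitChar_digit m h
  | case2 m h IH =>
      rw [myDigits, if_neg h]
      intro c hc
      rcases List.mem_append.mp hc with hc | hc
      · exact IH c hc
      · simp at hc; subst hc; exact digitChar_digit _ (Nat.mod_lt _ (by omega))

lemma myDigits_ne_nil (m : Nat) : myDigits m ≠ [] := by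
  rw [myDigits]
  split <;> simp

lemma foldl_dstep_shift (l : List Char) : ∀ (a : Nat),
    List.foldl dstep a l = a * 10 ^ l.length + List.foldl dstep 0 l := by
  induction l with
  | nil => intro a; simp
  | cons c tl IH =>
      intro a
      rw [List.foldl_cons, List.foldl_cons, IH (dstep a c), IH (dstep 0 c)]
      simp only [dstep, List.length_cons]
      ring

lemma dval_cons (c : Char) (tl : List Char) :
    dval (c :: tl) = (c.toNat - '0'.toNat) * 10 ^ tl.length + dval tl := by
  rw [dval, List.foldl_cons, foldl_dstep_shift]
  simp [dstep, dval]

lemma dval_append (l1 l2 : List Char) :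
    dval (l1 ++ l2) = dval l1 * 10 ^ l2.length + dval l2 := by
  rw [dval, List.foldl_append, foldl_dstep_shift]
  rfl

lemma dval_replicate_zero (j : Nat) : dval (List.replicate j '0') = 0 := by
  induction j with
  | zero => simp [dval]
  | succ j IH =>
      rw [List.replicate_succ, dval, List.foldl_cons]
      show List.foldl dstep (dstep 0 '0') (List.replicate j '0') = 0
      rw [foldl_dstep_shift]
      simpa [dstep] using IH

lemma dval_myDigits (m : Nat) : dval (myDigits m) = m := by
  induction m using myDigits.induct with
  | case1 m h =>
      rw [myDigits, if_pos h]
      show dstep 0 (Nat.digitChar m) = m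
      simp only [dstep]
      rw [digitChar_val m h]
      omega
  | case2 m h IH =>
      rw [myDigits, if_neg h, dval_append, IH]
      have hv : dval [Nat.digitChar (m % 10)] = m % 10 := by
        show dstep 0 (Nat.digitChar (m % 10)) = m % 10
        simp only [dstep]
        rw [digitChar_val _ (Nat.mod_lt _ (by omega))]
        omega
      rw [hv, List.length_singleton, pow_one]
      omega

lemma myDigits_head_ne_zero (m : Nat) (hm : 1 ≤ m) :
    ∀ c tl, myDigits m = c :: tl → c ≠ '0' := by
  induction m using myDigits.induct with
  | case1 m h =>
      intro c tl heq
      rw [myDigits, if_pos h] at heq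
      injection heq with h1 _
      subst h1
      exact digitChar_ne_zero m hm h
  | case2 m h IH =>
      intro c tl heq
      rw [myDigits, if_neg h] at heq
      rcases hd : myDigits (m / 10) with _ | ⟨c', tl'⟩
      · exact absurd hd (myDigits_ne_nil _)
      · rw [hd] at heq
        injection heq with h1 _
        subst h1
        exact IH (by omega) _ _ hd

lemma myDigits_length_one (m : Nat) : (myDigits m).length = 1 ↔ m < 10 := by
  constructor
  · intro hl
    by_contra h
    rw [myDigits, if_neg h] at hl
    have := myDigits_ne_nil (m / 10)
    rcases myDigits (m / 10) with _ | _ <;> simp_all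
  · intro h; rw [myDigits, if_pos h]; rfl

-- positive leading digit makes the value positive
lemma dval_pos (c : Char) (tl : List Char) (hc : c.isDigit = true) (h0 : c ≠ '0') :
    1 ≤ dval (c :: tl) := by
  have h48 : '0'.toNat = 48 := by decide
  have hb : 48 ≤ c.toNat ∧ c.toNat ≤ 57 := digit_bounds c hc
  have hne : c.toNat ≠ 48 := by
    intro he
    exact h0 (Char.ext (UInt32.toNat_inj.mp (by show c.toNat = ('0':Char).toNat; rw [he]; decide)))
  have h1 : 1 ≤ c.toNat - '0'.toNat := by omega
  rw [dval_cons]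
  have : 1 ≤ 10 ^ tl.length := Nat.one_le_pow _ _ (by omega)
  have := Nat.mul_le_mul h1 this
  omega

-- a fold whose step fixes every state is the identity
lemma foldl_fix {α β : Type} (f : α → β → α) (l : List β)
    (h : ∀ (a : α) (x : β), x ∈ l → f a x = a) : ∀ (a : α), l.foldl f a = a := by
  induction l with
  | nil => intro a; rfl
  | cons x tl IH =>
      intro a
      rw [List.foldl_cons, h a x (by simp)]
      exact IH (fun a y hy => h a y (by simp [hy])) a

-- the inner-loop condition of A is false for every zero count j below len-1-i
lemma cond_ne (M : Nat) (hM : 10 ≤ M) (i j : Int) (hi : 0 ≤ i)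
    (hj : 1 ≤ j) (hjm : j < ((myDigits M).length : Int) - i - 1) :
    ¬ ((PySem.Int.ofChars? (PySem.List.slice (myDigits M) none (some (i+1)))).getD 0
       + (PySem.Int.ofChars? (PySem.List.slice (myDigits M) none (some (i+1)) ++ List.replicate j.toNat '0')).getD 0
       = (M : Int)) := by
  intro hcond
  rw [PySem.List.slice_to _ (by omega)] at hcond
  have hdig := myDigits_digits M
  have hne := myDigits_ne_nil M
  have hLpos : 1 ≤ (myDigits M).length := List.length_pos_of_ne_nil hne
  have hkL : (i+1).toNat ≤ (myDigits M).length := by omega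
  have hpre_dig : ∀ c ∈ List.take (i+1).toNat (myDigits M), c.isDigit = true :=
    fun c hc => hdig c (List.take_subset _ _ hc)
  have hpre_ne : List.take (i+1).toNat (myDigits M) ≠ [] := by
    rw [Ne, List.take_eq_nil_iff]
    rintro (h | h)
    · omega
    · exact hne h
  have hzd : ∀ c ∈ List.take (i+1).toNat (myDigits M) ++ List.replicate j.toNat '0', c.isDigit = true := by
    intro c hc
    rcases List.mem_append.mp hc with hc | hc
    · exact hpre_dig c hc
    · rw [List.eq_of_mem_replicate hc]; decide
  rw [ofChars?_digits _ hpre_ne hpre_dig,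
      ofChars?_digits _ (by simp [hpre_ne]) hzd] at hcond
  simp only [Option.getD_some] at hcond
  rw [dval_append, dval_replicate_zero, List.length_replicate] at hcond
  -- split the whole digit string at position i+1
  have hsplit : dval (List.take (i+1).toNat (myDigits M)) * 10 ^ ((myDigits M).length - (i+1).toNat)
      + dval (List.drop (i+1).toNat (myDigits M)) = M := by
    have e := dval_append (List.take (i+1).toNat (myDigits M)) (List.drop (i+1).toNat (myDigits M))
    rw [List.take_append_drop, dval_myDigits, List.length_drop] at e
    omega
  have hp1 : 1 ≤ dval (List.take (i+1).toNat (myDigits M)) := by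
    rcases hd : myDigits M with _ | ⟨c, tl⟩
    · exact absurd hd hne
    · obtain ⟨k', hk'⟩ : ∃ k', (i+1).toNat = k' + 1 := ⟨(i+1).toNat - 1, by omega⟩
      rw [hk', List.take_succ_cons]
      refine dval_pos c _ ?_ (myDigits_head_ne_zero M (by omega) c tl hd)
      exact hdig c (by rw [hd]; simp)
  -- pure arithmetic contradiction
  have hcN : dval (List.take (i+1).toNat (myDigits M))
      + dval (List.take (i+1).toNat (myDigits M)) * 10 ^ j.toNat = M := by
    exact_mod_cast hcond
  have hjnm : j.toNat < (myDigits M).length - (i+1).toNat := by omega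
  have hXpos : 1 ≤ (10:Nat) ^ ((myDigits M).length - (i+1).toNat - 1) :=
    Nat.one_le_pow _ _ (by omega)
  have hpow : (10:Nat) ^ j.toNat ≤ 10 ^ ((myDigits M).length - (i+1).toNat - 1) :=
    Nat.pow_le_pow_right (by omega) (by omega)
  have h1 : dval (List.take (i+1).toNat (myDigits M)) * 10 ^ j.toNat
      ≤ dval (List.take (i+1).toNat (myDigits M)) * 10 ^ ((myDigits M).length - (i+1).toNat - 1) :=
    Nat.mul_le_mul_left _ hpow
  have h2 : dval (List.take (i+1).toNat (myDigits M)) * 10 ^ ((myDigits M).length - (i+1).toNat)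
      = 10 * (dval (List.take (i+1).toNat (myDigits M)) * 10 ^ ((myDigits M).length - (i+1).toNat - 1)) := by
    conv_lhs => rw [show (myDigits M).length - (i+1).toNat
      = ((myDigits M).length - (i+1).toNat - 1) + 1 from by omega]
    rw [pow_succ]; ring
  have h3 : dval (List.take (i+1).toNat (myDigits M))
      ≤ dval (List.take (i+1).toNat (myDigits M)) * 10 ^ ((myDigits M).length - (i+1).toNat - 1) :=
    Nat.le_mul_of_pos_right _ (by omega)
  omega

-- ===== VERDICT (by name: the statement is the Claim_ definition above) =====
theorem can_vanya_win_spec : Claim_equal_can_vanya_win := by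
  intro n hdom hpre
  unfold Spec_can_vanya_win
  lift n to ℕ using hpre with M
  unfold can_vanya_win can_vanya_win_alt
  simp only [toChars_eq _ (by positivity : (0:Int) ≤ (M:Int)), Int.toNat_natCast, PySem.List.len_eq]
  by_cases hL : ((myDigits M).length : Int) = 1
  · rw [if_pos hL, if_pos hL]
  · rw [if_neg hL, if_neg hL]
    have hM : 10 ≤ M := by
      by_contra h
      exact hL (by exact_mod_cast (myDigits_length_one M).mpr (by omega))
    refine PySem.List.foldl_congr_mem _ _ _ _ ?_
    intro acc i hi
    obtain ⟨hi0, hiL⟩ := PySem.List.mem_pyRange_one.mp hi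
    by_cases hm : 1 ≤ ((myDigits M).length : Int) - i - 1
    · rw [if_pos hm]
      have hfix : ∀ (st2 : Int × List Int) (j : Int), j ∈ PySem.List.pyRange 1 (((myDigits M).length : Int) - i - 1) →
          (if (PySem.Int.ofChars? (PySem.List.slice (myDigits M) none (some (i + 1)))).getD 0 +
              (PySem.Int.ofChars? (PySem.List.slice (myDigits M) none (some (i + 1)) ++ List.replicate j.toNat '0')).getD 0 = (M:Int) then
            (st2.1 + 1, st2.2 ++ [(PySem.Int.ofChars? (PySem.List.slice (myDigits M) none (some (i + 1)))).getD 0])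
          else st2) = st2 := by
        intro st2 j hj
        obtain ⟨hj1, hj2⟩ := PySem.List.mem_pyRange_one.mp hj
        exact if_neg (cond_ne M hM i j hi0 hj1 hj2)
      conv_lhs => rw [show ((myDigits M).length : Int) - i = (((myDigits M).length : Int) - i - 1) + 1 from by ring]
      rw [PySem.List.pyRange_one_succ_right (by omega), List.foldl_append,
        foldl_fix _ (PySem.List.pyRange 1 (((myDigits M).length : Int) - i - 1)) hfix acc]
      rfl
    · rw [if_neg hm, PySem.List.pyRange_one_eq_nil (by omega)]
      rfl
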